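-- pv_equiv track=rewrite | github.com/indrjo/minimal-texlive-installer | flytex/python-flytex/flytex.py | find_packages
-- ===== SOURCE A (Python) =====
-- def find_packages(fp, lns):
--   if len(lns) >= 2:
--     pkg, path, rem = lns[0], lns[1], lns[2:]
--     if path.endswith('/' + fp):
--       return [pkg[:-1]] + find_packages(fp, rem)
--     else:
--       return find_packages(fp, rem)
--   else:
--     return []
-- ===== SOURCE B (Python) =====
-- def find_packages(fp, lns):
--     result = []
--     i = 0
--     while i + 1 < len(lns):
--         pkg = lns[i]
--         path = lns[i + 1]
--         if path.endswith('/' + fp):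
--             result.append(pkg[:-1])
--         i += 2
--     return result
-- ===== Notes on version B (the rewrite author's own statement) =====
-- stated objective: faster
-- what changed: Replaced the recursion over tail slices (each step copies lns[2:]) with a single iterative index loop stepping by 2 into an accumulator list.
import Mathlib
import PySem

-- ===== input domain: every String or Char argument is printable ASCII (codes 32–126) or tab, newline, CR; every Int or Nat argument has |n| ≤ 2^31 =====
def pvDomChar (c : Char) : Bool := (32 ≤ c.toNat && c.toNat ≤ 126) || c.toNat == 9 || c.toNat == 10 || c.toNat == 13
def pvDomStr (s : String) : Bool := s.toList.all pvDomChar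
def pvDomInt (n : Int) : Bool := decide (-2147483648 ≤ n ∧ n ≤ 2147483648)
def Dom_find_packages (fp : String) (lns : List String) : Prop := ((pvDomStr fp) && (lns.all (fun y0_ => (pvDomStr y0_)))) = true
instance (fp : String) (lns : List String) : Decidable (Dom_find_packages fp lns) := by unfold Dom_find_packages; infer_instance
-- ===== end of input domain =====

-- B replaces A's recursion over copied tail slices by one iterative index loop stepping by 2 into an accumulator.

-- ===== PORT A =====
-- A: recursion on pkg, path, rem = lns[0], lns[1], lns[2:]
def find_packages (fp : String) (lns : List String) : List String :=
  if lns.length ≥ 2 then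
    if PySem.Str.endswith (PySem.List.pyGetD lns 1 "") (String.ofList ('/' :: fp.toList)) then
      (PySem.Str.slice (PySem.List.pyGetD lns 0 "") none (some (-1)))
        :: find_packages fp (PySem.List.slice lns (some 2) none)
    else
      find_packages fp (PySem.List.slice lns (some 2) none)
  else []
termination_by lns.length
decreasing_by
  all_goals
    simp [PySem.List.slice]
    omega

-- ===== PORT B =====
-- B's while loop: while i + 1 < len(lns): pkg, path = lns[i], lns[i+1]; maybe append pkg[:-1]; i += 2
def find_packages_alt_loop (fp : String) (lns : List String) (i : Nat) (result : List String) : List String :=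
  if h : i + 1 < lns.length then
    find_packages_alt_loop fp lns (i + 2)
      (if PySem.Str.endswith (lns[i + 1]'h) (String.ofList ('/' :: fp.toList)) then
        result ++ [PySem.Str.slice (lns[i]'(by omega)) none (some (-1))]
      else result)
  else result
termination_by lns.length - i

def find_packages_alt (fp : String) (lns : List String) : List String :=
  find_packages_alt_loop fp lns 0 []

-- ===== PRECONDITION & SPEC =====
def Spec_find_packages (fp : String) (lns : List String) (out : List String) : Prop := out = find_packages_alt fp lns
instance (fp : String) (lns : List String) (out : List String) : Decidable (Spec_find_packages fp lns out) := by unfold Spec_find_packages; infer_instance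

-- ===== CLAIM (what is proved, stated in full; the proofs are below) =====
def Claim_equal_find_packages : Prop := ∀ (fp : String) (lns : List String), Dom_find_packages fp lns → Spec_find_packages fp lns (find_packages fp lns)

-- ===== LEMMAS AND PROOFS =====

-- loop invariant: running B's loop at index |pre| over pre ++ l2 appends A's result on l2
theorem find_packages_alt_loop_eq (fp : String) (l2 pre result : List String) :
    find_packages_alt_loop fp (pre ++ l2) pre.length result
      = result ++ find_packages fp l2 := by
  match l2 with
  | [] =>
    rw [find_packages_alt_loop, dif_neg (by simp), find_packages, if_neg (by simp)]
    simp
  | [x] =>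
    rw [find_packages_alt_loop, dif_neg (by simp), find_packages, if_neg (by simp)]
    simp
  | p :: q :: rest =>
    have hcond : pre.length + 1 < (pre ++ p :: q :: rest).length := by simp
    have e1 : (pre ++ p :: q :: rest)[pre.length]'(by simp) = p := by simp
    have e2 : (pre ++ p :: q :: rest)[pre.length + 1]'hcond = q := by
      rw [List.getElem_append_right (by omega)]
      simp
    rw [find_packages_alt_loop, dif_pos hcond, e1, e2]
    have hsplit : pre ++ p :: q :: rest = (pre ++ [p, q]) ++ rest := by simp
    have hlen2 : pre.length + 2 = (pre ++ [p, q]).length := by simp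
    rw [hsplit, hlen2, find_packages_alt_loop_eq fp rest (pre ++ [p, q]) _]
    conv_rhs => rw [find_packages]
    have hlen3 : (p :: q :: rest).length ≥ 2 := by simp
    rw [if_pos hlen3]
    have hq1 : PySem.List.pyGetD (p :: q :: rest) 1 "" = q := by
      simp [PySem.List.pyGetD]
    have hq0 : PySem.List.pyGetD (p :: q :: rest) 0 "" = p := by
      simp [PySem.List.pyGetD]
    have hrem : PySem.List.slice (p :: q :: rest) (some 2) none = rest := by
      simp [PySem.List.slice]
    rw [hq1, hq0]
    by_cases hend : PySem.Str.endswith q (String.ofList ('/' :: fp.toList)) = true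
    · rw [if_pos hend, if_pos hend, hrem]
      simp
    · rw [if_neg hend, if_neg hend, hrem]
termination_by l2.length

-- ===== VERDICT (by name: the statement is the Claim_ definition above) =====
theorem find_packages_spec : Claim_equal_find_packages := by
  intro fp lns _
  unfold Spec_find_packages find_packages_alt
  have h := find_packages_alt_loop_eq fp lns [] []
  simpa using h.symm
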